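-- pv_equiv track=rewrite | github.com/Tomjohnsonellis/Programming-Bookwork | MathHammer/weapons_simulator.py | determine_hits
-- ===== SOURCE A (Python) =====
-- def determine_hits(hit_rolls, ballistic_skill):
--     hits = 0
--     crit_hits = 0
--     # crit_misses = 0
--     for roll in hit_rolls:
--         if roll >= ballistic_skill:
--             hits += 1
--         if roll == 6:
--             crit_hits += 1
--         # if roll == 1:
--         #     crit_misses += 1
--
--     return hits, crit_hits
-- ===== SOURCE B (Python) =====
-- def determine_hits(hit_rolls, ballistic_skill):
--     counts = {}
--     for roll in hit_rolls:
--         counts[roll] = counts.get(roll, 0) + 1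
--     crit_hits = counts.get(6, 0)
--     hits = 0
--     for value, count in counts.items():
--         if value >= ballistic_skill:
--             hits += count
--     return hits, crit_hits
-- ===== Notes on version B (the rewrite author's own statement) =====
-- stated objective: alternative
-- what changed: B builds a frequency table of the rolls once, reads the critical-hit count directly from the 6 entry, and sums the counts of the distinct roll values that meet the ballistic skill, instead of scanning every roll with two conditionals.
import Mathlib
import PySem

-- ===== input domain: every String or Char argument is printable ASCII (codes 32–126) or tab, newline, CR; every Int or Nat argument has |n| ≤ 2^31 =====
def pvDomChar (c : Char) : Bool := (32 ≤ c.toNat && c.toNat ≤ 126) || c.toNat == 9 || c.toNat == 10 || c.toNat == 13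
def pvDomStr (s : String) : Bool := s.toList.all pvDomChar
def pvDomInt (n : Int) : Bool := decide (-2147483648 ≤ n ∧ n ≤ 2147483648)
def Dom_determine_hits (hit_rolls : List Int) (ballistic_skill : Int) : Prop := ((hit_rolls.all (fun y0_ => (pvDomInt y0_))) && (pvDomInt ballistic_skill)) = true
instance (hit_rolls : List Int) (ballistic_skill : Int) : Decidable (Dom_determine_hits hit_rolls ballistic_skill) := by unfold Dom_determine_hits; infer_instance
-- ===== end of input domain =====

-- B replaces the per-roll double scan by a frequency table: crit hits come from the table's 6 entry
-- and hits from summing counts of distinct values meeting the skill (objective: alternative).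


-- ===== PORT A =====
def determine_hits (hit_rolls : List Int) (ballistic_skill : Int) : Int × Int :=
  let st := hit_rolls.foldl
    (fun (st : Int × Int) roll =>
      let st := if roll ≥ ballistic_skill then (st.1 + 1, st.2) else st
      if roll = 6 then (st.1, st.2 + 1) else st)
    (0, 0)
  (st.1, st.2)

-- ===== PORT B =====
def determine_hits_alt (hit_rolls : List Int) (ballistic_skill : Int) : Int × Int :=
  let counts : PySem.Dict Int Int :=
    hit_rolls.foldl (fun d roll => d.insert roll (d.getD roll 0 + 1)) PySem.Dict.empty
  let crit_hits := counts.getD 6 0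
  let hits := counts.items.foldl
    (fun (hits : Int) vc => if vc.1 ≥ ballistic_skill then hits + vc.2 else hits) 0
  (hits, crit_hits)

-- ===== PRECONDITION & SPEC =====
def Spec_determine_hits (hit_rolls : List Int) (ballistic_skill : Int) (out : Int × Int) : Prop := out = determine_hits_alt hit_rolls ballistic_skill
instance (hit_rolls : List Int) (ballistic_skill : Int) (out : Int × Int) : Decidable (Spec_determine_hits hit_rolls ballistic_skill out) := by unfold Spec_determine_hits; infer_instance

-- ===== CLAIM (what is proved, stated in full; the proofs are below) =====
def Claim_equal_determine_hits : Prop := ∀ (hit_rolls : List Int) (ballistic_skill : Int), Dom_determine_hits hit_rolls ballistic_skill → Spec_determine_hits hit_rolls ballistic_skill (determine_hits hit_rolls ballistic_skill)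

-- ===== LEMMAS AND PROOFS =====

-- A's fold with arbitrary accumulators computes (hits so far + countP, crits so far + count 6)
theorem determine_hits_fold (bs : Int) (xs : List Int) : ∀ a b : Int,
    xs.foldl (fun (st : Int × Int) roll =>
      let st := if roll ≥ bs then (st.1 + 1, st.2) else st
      if roll = 6 then (st.1, st.2 + 1) else st) (a, b)
    = (a + (xs.countP (fun r => bs ≤ r) : Int), b + (xs.count 6 : Int)) := by
  induction xs with
  | nil => intro a b; simp
  | cons x xs ih =>
    intro a b
    simp only [List.foldl_cons, List.countP_cons, List.count_cons]
    by_cases h1 : bs ≤ x <;> rcases eq_or_ne x 6 with rfl | h2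
    · simp [h1, ih]; constructor <;> ring
    · simp [h1, h2, ih, ge_iff_le]; ring
    · simp [h1, ih, ge_iff_le]; ring
    · simp [h1, h2, ih, ge_iff_le]

theorem determine_hits_eq_count (xs : List Int) (bs : Int) :
    determine_hits xs bs = ((xs.countP (fun r => bs ≤ r) : Int), (xs.count 6 : Int)) := by
  show (_, _) = _
  rw [determine_hits_fold bs xs 0 0]
  simp

-- B's guarded accumulation loop is an initial value plus a sum
theorem foldl_add_if (bs : Int) (g : Int → Int) :
    ∀ (ks : List Int) (h0 : Int),
      ks.foldl (fun h k => if bs ≤ k then h + g k else h) h0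
        = h0 + (ks.map (fun k => if bs ≤ k then g k else 0)).sum := by
  intro ks
  induction ks with
  | nil => intro h0; simp
  | cons k ks ih =>
    intro h0
    by_cases h : bs ≤ k <;> (simp [h, ih]; try ring)

-- summing multiplicities over the distinct values ≥ bs counts the elements ≥ bs
theorem sum_over_distinct (bs : Int) :
    ∀ (ks : List Int), ks.Nodup → ∀ (xs : List Int), (∀ a ∈ xs, a ∈ ks) →
      (ks.map (fun k => if bs ≤ k then (xs.count k : Int) else 0)).sum
        = (xs.countP (fun r => bs ≤ r) : Int) := by
  intro ks
  induction ks with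
  | nil =>
    intro _ xs hmem
    have hx : xs = [] := List.eq_nil_iff_forall_not_mem.mpr (fun a ha => by simpa using hmem a ha)
    simp [hx]
  | cons k ks ih =>
    intro hnd xs hmem
    have hk : k ∉ ks := (List.nodup_cons.mp hnd).1
    have hnd' : ks.Nodup := (List.nodup_cons.mp hnd).2
    set xs' := xs.filter (fun a => !(a == k)) with hxs'
    have hmem' : ∀ a ∈ xs', a ∈ ks := by
      intro a ha
      rw [hxs', List.mem_filter] at ha
      have h1 := hmem a ha.1
      have h2 : a ≠ k := by simpa using ha.2
      rcases List.mem_cons.mp h1 with h | h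
      · exact absurd h h2
      · exact h
    have hcnt : ∀ k' ∈ ks, xs'.count k' = xs.count k' := by
      intro k' hk'
      have hne : k' ≠ k := fun h => hk (h ▸ hk')
      rw [hxs', List.count_filter]
      simp [hne]
    have hsplit : (xs.countP (fun r => bs ≤ r) : Int)
        = (if bs ≤ k then (xs.count k : Int) else 0) + (xs'.countP (fun r => bs ≤ r) : Int) := by
      rw [List.countP_eq_countP_filter_add _ _ (fun a => a == k)]
      push_cast
      congr 1
      · rw [List.countP_filter]
        by_cases h : bs ≤ k
        · rw [if_pos h, List.count]
          congr 1
          · apply List.countP_congr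
            intro a _
            by_cases hak : a = k <;> simp [hak, h]
        · rw [if_neg h]
          norm_cast
          rw [List.countP_eq_zero]
          intro a _
          by_cases hak : a = k <;> simp [hak, h]
    have hmap : (ks.map (fun k' => if bs ≤ k' then (xs.count k' : Int) else 0))
        = ks.map (fun k' => if bs ≤ k' then (xs'.count k' : Int) else 0) := by
      apply List.map_congr_left
      intro a ha
      rw [hcnt a ha]
    rw [List.map_cons, List.sum_cons, hmap, ih hnd' xs' hmem', hsplit]

theorem determine_hits_alt_eq_count (xs : List Int) (bs : Int) :
    determine_hits_alt xs bs = ((xs.countP (fun r => bs ≤ r) : Int), (xs.count 6 : Int)) := by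
  show ((PySem.Dict.counter xs).items.foldl
      (fun (hits : Int) vc => if vc.1 ≥ bs then hits + vc.2 else hits) 0,
    (PySem.Dict.counter xs).getD 6 0) = _
  rw [PySem.Dict.getD_counter, PySem.Dict.items_counter]
  rw [List.foldl_map]
  simp only [ge_iff_le]
  rw [foldl_add_if bs (fun k => (xs.count k : Int)) (PySem.Set.ofList xs) 0]
  rw [sum_over_distinct bs (PySem.Set.ofList xs) (PySem.Set.nodup_ofList xs)
      xs (fun a ha => (PySem.Set.mem_ofList xs a).mpr ha)]
  simp

-- ===== VERDICT (by name: the statement is the Claim_ definition above) =====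
theorem determine_hits_spec : Claim_equal_determine_hits := by
  intro xs bs _
  show _ = _
  rw [determine_hits_eq_count, determine_hits_alt_eq_count]
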